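-- pv_equiv track=rewrite | github.com/gbaniulyte/smf_primers | smf_primers.py | gcg_positions
-- ===== SOURCE A (Python) =====
-- def gcg_positions(seq):
-- 	gcg_list = []
-- 	for pos in range(0, len(seq)+1):
-- 		di_nt = seq[pos:pos+2]
-- 		if di_nt == 'GC':
-- 			gcg_list.append(pos+1)
-- 		elif di_nt == 'CG':
-- 			gcg_list.append(pos)
-- 	return list(set(gcg_list)) #remove duplicates that arise due to GCG motifs
-- ===== SOURCE B (Python) =====
-- def gcg_positions(seq):
-- 	# C-centric single pass: a position belongs to the result exactly when it
-- 	# holds a 'C' whose left or right neighbour is a 'G'; such indices are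
-- 	# already distinct and collected in increasing order, so no dedup pass.
-- 	return [i for i in range(len(seq))
-- 		if seq[i:i+1] == 'C'
-- 		and (seq[i-1:i] == 'G' or seq[i+1:i+2] == 'G')]
-- ===== Notes on version B (the rewrite author's own statement) =====
-- stated objective: simpler
-- what changed: Replaces the two-branch GC/CG dinucleotide scan over range(len(seq)+1) followed by a set() dedup pass with a single C-centric comprehension over range(len(seq)) that tests each position's neighbours and never produces duplicates, so no dedup is needed (the return value is compared as a set; B emits the positions in increasing order).
import Mathlib
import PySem

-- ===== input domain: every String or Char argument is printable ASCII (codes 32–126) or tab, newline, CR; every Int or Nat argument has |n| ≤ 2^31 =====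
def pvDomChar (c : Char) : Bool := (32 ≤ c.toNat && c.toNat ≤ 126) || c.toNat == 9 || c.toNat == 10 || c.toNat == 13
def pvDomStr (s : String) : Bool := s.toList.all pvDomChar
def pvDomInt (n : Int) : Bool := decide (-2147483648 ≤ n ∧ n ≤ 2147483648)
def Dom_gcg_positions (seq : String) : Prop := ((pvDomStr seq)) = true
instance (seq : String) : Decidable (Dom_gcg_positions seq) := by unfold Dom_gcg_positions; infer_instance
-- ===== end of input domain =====

-- B replaces A's two-branch GC/CG scan plus set() dedup with a single C-centric
-- neighbour-test comprehension that never produces duplicates (simpler; return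
-- value equal as a set — the positions — with B listing them in increasing order).

-- ===== PORT A =====
def gcg_positions (seq : String) : List Int :=
  let gcg_list := (PySem.List.pyRange 0 (PySem.Str.len seq + 1) 1).foldl
    (fun gcg_list pos =>
      let di_nt := PySem.Str.slice seq (some pos) (some (pos + 2))
      if di_nt == "GC" then gcg_list ++ [pos + 1]
      else if di_nt == "CG" then gcg_list ++ [pos]
      else gcg_list) []
  PySem.Set.ofList gcg_list

-- ===== PORT B =====
def gcg_positions_alt (seq : String) : List Int :=
  (PySem.List.pyRange 0 (PySem.Str.len seq) 1).filter
    (fun i =>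
      PySem.Str.slice seq (some i) (some (i + 1)) == "C" &&
      (PySem.Str.slice seq (some (i - 1)) (some i) == "G" ||
       PySem.Str.slice seq (some (i + 1)) (some (i + 2)) == "G"))

-- ===== PRECONDITION & SPEC =====
def Spec_gcg_positions (seq : String) (out : List Int) : Prop := out = gcg_positions_alt seq
instance (seq : String) (out : List Int) : Decidable (Spec_gcg_positions seq out) := by unfold Spec_gcg_positions; infer_instance

-- ===== CLAIM (what is proved, stated in full; the proofs are below) =====
def Claim_equal_gcg_positions : Prop := ∀ (seq : String), Dom_gcg_positions seq → Spec_gcg_positions seq (gcg_positions seq)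

-- ===== LEMMAS AND PROOFS =====

-- string equality through code points
lemma strEq_iff (s t : String) : s = t ↔ s.toList = t.toList :=
  ⟨congrArg _, String.toList_inj.mp⟩

-- what A appends for a given pos, as a list-valued function (proof-only helper)
def gA (cs : List Char) (pos : Int) : List Int :=
  if PySem.List.slice cs (some pos) (some (pos + 2)) = ['G', 'C'] then [pos + 1]
  else if PySem.List.slice cs (some pos) (some (pos + 2)) = ['C', 'G'] then [pos]
  else []

-- the characterising predicate: position k holds 'C' with a 'G' neighbour
def Qn (cs : List Char) (k : Nat) : Prop :=
  cs[k]? = some 'C' ∧ ((∃ j : Nat, k = j + 1 ∧ cs[j]? = some 'G') ∨ cs[k + 1]? = some 'G')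

lemma toList_G : ("G" : String).toList = ['G'] := by decide
lemma toList_C : ("C" : String).toList = ['C'] := by decide

lemma take_two_iff (l : List Char) (a b : Char) :
    l.take 2 = [a, b] ↔ (l[0]? = some a ∧ l[1]? = some b) := by
  match l with
  | [] => simp
  | [x] => simp
  | x :: y :: t => simp [List.take]

lemma take_one_iff (l : List Char) (a : Char) :
    l.take 1 = [a] ↔ l[0]? = some a := by
  match l with
  | [] => simp
  | x :: t => simp [List.take]

lemma slice_pair_iff (cs : List Char) (p : Nat) (a b : Char) :
    PySem.List.slice cs (some (p : Int)) (some ((p : Int) + 2)) = [a, b] ↔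
      (cs[p]? = some a ∧ cs[p + 1]? = some b) := by
  have h2 : ((p : Int) + 2) = ((p : Int) + ((2 : Nat) : Int)) := by push_cast; ring
  rw [h2, PySem.List.slice_natCast_add, take_two_iff]
  simp [List.getElem?_drop]

lemma slice_one_iff (cs : List Char) (p : Nat) (a : Char) :
    PySem.List.slice cs (some (p : Int)) (some ((p : Int) + 1)) = [a] ↔ cs[p]? = some a := by
  have h1 : ((p : Int) + 1) = ((p : Int) + ((1 : Nat) : Int)) := by push_cast; ring
  rw [h1, PySem.List.slice_natCast_add, take_one_iff]
  simp

lemma slice_neg_one_zero (cs : List Char) :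
    PySem.List.slice cs (some (-1 : Int)) (some (0 : Int)) = [] := by
  apply List.eq_nil_of_length_eq_zero
  rw [PySem.List.length_slice]
  simp [PySem.List.clampIdx]

-- A rewritten as a flatMap of gA over the scanned range
lemma A_eq_flatMap (seq : String) :
    gcg_positions seq =
      PySem.Set.ofList
        ((PySem.List.pyRange 0 ((seq.toList.length : Int) + 1) 1).flatMap (gA seq.toList)) := by
  unfold gcg_positions
  have hlen : PySem.Str.len seq = (seq.toList.length : Int) := by simp [pysem]
  rw [hlen]
  rw [show (fun (gcg_list : List Int) (pos : Int) =>
      let di_nt := PySem.Str.slice seq (some pos) (some (pos + 2))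
      if di_nt == "GC" then gcg_list ++ [pos + 1]
      else if di_nt == "CG" then gcg_list ++ [pos]
      else gcg_list) = (fun acc pos => acc ++ gA seq.toList pos) from ?_]
  · rw [PySem.List.foldl_append_eq_flatMap]; simp
  · funext acc pos
    simp only [gA, strEq_iff, PySem.Str.toList_slice, PySem.Chars.slice_eq_listSlice, beq_iff_eq]
    split_ifs <;> simp_all

lemma mem_gA (cs : List Char) (pos x : Int) :
    x ∈ gA cs pos → x = pos ∨ x = pos + 1 := by
  unfold gA; split_ifs <;> simp_all

lemma mem_flatMap_iff (cs : List Char) (x : Int) :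
    (x ∈ (PySem.List.pyRange 0 ((cs.length : Int) + 1) 1).flatMap (gA cs)) ↔
      ∃ k : Nat, x = (k : Int) ∧ Qn cs k := by
  rw [List.mem_flatMap]
  constructor
  · rintro ⟨pos, hr, hx⟩
    rw [PySem.List.mem_pyRange_one] at hr
    obtain ⟨p, rfl⟩ := Int.eq_ofNat_of_zero_le hr.1
    unfold gA at hx
    split_ifs at hx with h1 h2
    · rw [slice_pair_iff] at h1
      simp at hx
      refine ⟨p + 1, by omega, ?_, Or.inl ⟨p, rfl, h1.1⟩⟩
      exact h1.2
    · rw [slice_pair_iff] at h2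
      simp at hx
      exact ⟨p, by omega, h2.1, Or.inr h2.2⟩
    · simp at hx
  · rintro ⟨k, rfl, hC, hG⟩
    rcases hG with ⟨j, rfl, hj⟩ | hr
    · -- 'G' on the left: A appends (j)+1 from the GC branch at pos = j
      refine ⟨(j : Int), ?_, ?_⟩
      · rw [PySem.List.mem_pyRange_one]
        obtain ⟨hjlt, -⟩ := List.getElem?_eq_some_iff.mp hj
        exact ⟨by positivity, by omega⟩
      · unfold gA
        rw [if_pos ((slice_pair_iff cs j 'G' 'C').mpr ⟨hj, hC⟩)]
        simp only [List.mem_singleton]; push_cast; ring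
    · -- 'G' on the right: A appends k from the CG branch at pos = k
      refine ⟨(k : Int), ?_, ?_⟩
      · rw [PySem.List.mem_pyRange_one]
        obtain ⟨hklt, -⟩ := List.getElem?_eq_some_iff.mp hC
        exact ⟨by positivity, by omega⟩
      · unfold gA
        have hne : ¬ PySem.List.slice cs (some (k : Int)) (some ((k : Int) + 2)) = ['G', 'C'] := by
          rw [slice_pair_iff]; rintro ⟨h, -⟩; rw [hC] at h; simp at h
        rw [if_neg hne, if_pos ((slice_pair_iff cs k 'C' 'G').mpr ⟨hC, hr⟩)]
        simp

-- A's appended list is nondecreasing (each pos contributes only pos or pos+1)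
lemma pairwise_flatMap (cs : List Char) (m : Nat) :
    ((PySem.List.pyRange 0 (m : Int) 1).flatMap (gA cs)).Pairwise (· ≤ ·) := by
  induction m with
  | zero => simp [PySem.List.pyRange_one_eq_nil]
  | succ m ih =>
    have hsplit : PySem.List.pyRange 0 ((m + 1 : Nat) : Int) 1 =
        PySem.List.pyRange 0 (m : Int) 1 ++ [(m : Int)] := by
      push_cast
      exact PySem.List.pyRange_one_succ_right (a := 0) (b := (m : Int)) (by positivity)
    rw [hsplit, List.flatMap_append]
    rw [List.pairwise_append]
    refine ⟨ih, ?_, ?_⟩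
    · simp only [List.flatMap_cons, List.flatMap_nil, List.append_nil]
      unfold gA; split_ifs <;> simp
    · intro x hx y hy
      rw [List.mem_flatMap] at hx
      obtain ⟨pos, hr, hxg⟩ := hx
      rw [PySem.List.mem_pyRange_one] at hr
      simp only [List.flatMap_cons, List.flatMap_nil, List.append_nil] at hy
      rcases mem_gA cs pos x hxg with rfl | rfl <;>
        rcases mem_gA cs (m : Int) y hy with rfl | rfl <;> omega

-- PySem.Set.ofList keeps the first occurrences in place: it is a sublist
lemma foldl_add_sublist {α : Type} [BEq α] (xs : List α) :
    ∀ s : List α, (xs.foldl PySem.Set.add s).Sublist (s ++ xs) := by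
  induction xs with
  | nil => intro s; simp
  | cons x xs ih =>
    intro s
    have h1 : (PySem.Set.add s x).Sublist (s ++ [x]) := by
      unfold PySem.Set.add
      split
      · exact List.sublist_append_left s [x]
      · exact List.Sublist.refl _
    have h2 : (xs.foldl PySem.Set.add (PySem.Set.add s x)).Sublist ((PySem.Set.add s x) ++ xs) := ih _
    have h3 : ((PySem.Set.add s x) ++ xs).Sublist ((s ++ [x]) ++ xs) := List.Sublist.append_right h1 xs
    have h4 := h2.trans h3
    simpa using h4

lemma ofList_sublist {α : Type} [BEq α] (xs : List α) :
    (PySem.Set.ofList xs).Sublist xs := by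
  have := foldl_add_sublist xs []
  simpa [PySem.Set.ofList_eq_foldl] using this

-- B's membership characterisation
lemma mem_alt_iff (seq : String) (x : Int) :
    x ∈ gcg_positions_alt seq ↔ ∃ k : Nat, x = (k : Int) ∧ Qn seq.toList k := by
  unfold gcg_positions_alt
  rw [List.mem_filter, PySem.List.mem_pyRange_one]
  have hlen : PySem.Str.len seq = (seq.toList.length : Int) := by simp [pysem]
  rw [hlen]
  constructor
  · rintro ⟨⟨h0, hlt⟩, hcond⟩
    obtain ⟨k, rfl⟩ := Int.eq_ofNat_of_zero_le h0
    refine ⟨k, rfl, ?_⟩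
    simp only [Bool.and_eq_true, Bool.or_eq_true, beq_iff_eq, strEq_iff,
      PySem.Str.toList_slice, PySem.Chars.slice_eq_listSlice] at hcond
    rw [toList_C, toList_G] at hcond
    obtain ⟨hC, hG⟩ := hcond
    rw [slice_one_iff] at hC
    refine ⟨by simpa using hC, ?_⟩
    rcases hG with hL | hR
    · -- left-neighbour slice equals "G": impossible at k = 0, else k = j+1
      rcases Nat.eq_zero_or_pos k with rfl | hk
      · exfalso
        rw [show ((0 : Nat) : Int) - 1 = (-1 : Int) by simp,
          show ((0 : Nat) : Int) = (0 : Int) by simp, slice_neg_one_zero] at hL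
        simp at hL
      · obtain ⟨j, rfl⟩ : ∃ j, k = j + 1 := ⟨k - 1, by omega⟩
        left
        refine ⟨j, rfl, ?_⟩
        rw [show ((j + 1 : Nat) : Int) - 1 = ((j : Nat) : Int) by push_cast; ring,
          show ((j + 1 : Nat) : Int) = ((j : Nat) : Int) + 1 by push_cast; ring,
          slice_one_iff] at hL
        simpa using hL
    · right
      rw [show ((k : Nat) : Int) + 2 = ((k + 1 : Nat) : Int) + 1 by push_cast; ring,
        show ((k : Nat) : Int) + 1 = ((k + 1 : Nat) : Int) by push_cast; ring] at hR
      rw [slice_one_iff] at hR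
      simpa using hR
  · rintro ⟨k, rfl, hC, hG⟩
    obtain ⟨hk, -⟩ := List.getElem?_eq_some_iff.mp hC
    refine ⟨⟨by positivity, by omega⟩, ?_⟩
    simp only [Bool.and_eq_true, Bool.or_eq_true, beq_iff_eq, strEq_iff,
      PySem.Str.toList_slice, PySem.Chars.slice_eq_listSlice, toList_C, toList_G]
    refine ⟨(slice_one_iff _ _ _).mpr (by simpa using hC), ?_⟩
    rcases hG with ⟨j, rfl, hj⟩ | hR
    · left
      rw [show ((j + 1 : Nat) : Int) - 1 = ((j : Nat) : Int) by push_cast; ring,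
        show ((j + 1 : Nat) : Int) = ((j : Nat) : Int) + 1 by push_cast; ring]
      exact (slice_one_iff _ _ _).mpr (by simpa using hj)
    · right
      rw [show ((k : Nat) : Int) + 2 = ((k + 1 : Nat) : Int) + 1 by push_cast; ring,
        show ((k : Nat) : Int) + 1 = ((k + 1 : Nat) : Int) by push_cast; ring]
      exact (slice_one_iff _ _ _).mpr (by simpa using hR)

lemma alt_nodup (seq : String) : (gcg_positions_alt seq).Nodup := by
  unfold gcg_positions_alt
  exact (PySem.List.nodup_pyRange_one _ _).filter _

lemma alt_pairwise (seq : String) : (gcg_positions_alt seq).Pairwise (· ≤ ·) := by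
  unfold gcg_positions_alt
  exact ((PySem.List.pairwise_lt_pyRange_one _ _).sublist List.filter_sublist).imp le_of_lt

-- ===== VERDICT (by name: the statement is the Claim_ definition above) =====
theorem gcg_positions_spec : Claim_equal_gcg_positions := by
  intro seq _
  unfold Spec_gcg_positions
  rw [A_eq_flatMap]
  set L := (PySem.List.pyRange 0 ((seq.toList.length : Int) + 1) 1).flatMap (gA seq.toList) with hL
  have hLp : L.Pairwise (· ≤ ·) := by
    have := pairwise_flatMap seq.toList (seq.toList.length + 1)
    rw [hL]; push_cast at this ⊢; exact this
  have h1 : (PySem.Set.ofList L).Pairwise (· ≤ ·) := hLp.sublist (ofList_sublist L)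
  have h2 : (PySem.Set.ofList L).Nodup := PySem.Set.nodup_ofList L
  have hmem : ∀ x, x ∈ PySem.Set.ofList L ↔ x ∈ gcg_positions_alt seq := by
    intro x
    rw [PySem.Set.mem_ofList, hL, mem_flatMap_iff, mem_alt_iff]
  have hperm : (PySem.Set.ofList L).Perm (gcg_positions_alt seq) :=
    (List.perm_ext_iff_of_nodup h2 (alt_nodup seq)).mpr hmem
  exact PySem.List.eq_of_perm_of_pairwise_le_of_injective (fun x => x)
    Function.injective_id hperm h1 (alt_pairwise seq)
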